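-- pv_equiv track=rewrite | github.com/zihyang-227/PilotAI | healthAI/code2.0(file1trial).py | merge_turn_windows
-- ===== SOURCE A (Python) =====
-- from collections import defaultdict, Counter
--
-- def merge_turn_windows(ep_len, window_outputs, turn_items):
--     votes = [defaultdict(list) for _ in range(ep_len)]
--     for start_local, rows in window_outputs:
--         if rows is None:
--             continue
--         for off, row in enumerate(rows):
--             idx = start_local + off
--             if 0 <= idx < ep_len:
--                 for it in turn_items:
--                     lab = it["label"]
--                     votes[idx][lab].append(str(row.get(lab, "0")).strip())
--
--     merged = []
--     for i in range(ep_len):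
--         row = {}
--         for it in turn_items:
--             lab = it["label"]
--             vals = votes[i].get(lab, [])
--             if not vals:
--                 row[lab] = "0"
--                 continue
--             is_binary = all(v in ("0", "1") for v in vals)
--             if is_binary:
--                 c = Counter(vals)
--                 row[lab] = "1" if c.get("1", 0) > c.get("0", 0) else "0"
--             else:
--                 # first non-default
--                 pick = None
--                 for v in vals:
--                     if v not in ("", "0", "NA", "N/A", "None"):
--                         pick = v
--                         break
--                 row[lab] = pick if pick is not None else vals[0]
--         merged.append(row)
--     return merged
-- ===== SOURCE B (Python) =====
-- _DEFAULTS = ("", "0", "NA", "N/A", "None")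
--
-- def merge_turn_windows(ep_len, window_outputs, turn_items):
--     # One pass: per-(index,label) aggregates instead of per-cell vote lists.
--     agg = {}
--     for start_local, rows in window_outputs:
--         if rows is None:
--             continue
--         for off, row in enumerate(rows):
--             idx = start_local + off
--             if 0 <= idx < ep_len:
--                 for it in turn_items:
--                     lab = it["label"]
--                     v = str(row.get(lab, "0")).strip()
--                     key = (idx, lab)
--                     if key in agg:
--                         ones, zeros, all_bin, first, nondef = agg[key]
--                     else:
--                         ones, zeros, all_bin, first, nondef = 0, 0, True, v, None
--                     if v == "1":
--                         ones += 1
--                     elif v == "0":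
--                         zeros += 1
--                     else:
--                         all_bin = False
--                     if nondef is None and v not in _DEFAULTS:
--                         nondef = v
--                     agg[key] = (ones, zeros, all_bin, first, nondef)
--     merged = []
--     for i in range(ep_len):
--         row = {}
--         for it in turn_items:
--             lab = it["label"]
--             a = agg.get((i, lab))
--             if a is None:
--                 row[lab] = "0"
--             else:
--                 ones, zeros, all_bin, first, nondef = a
--                 if all_bin:
--                     row[lab] = "1" if ones > zeros else "0"
--                 else:
--                     row[lab] = nondef if nondef is not None else first
--         merged.append(row)
--     return merged
-- ===== Notes on version B (the rewrite author's own statement) =====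
-- stated objective: alternative
-- what changed: Replaces the per-cell vote lists plus a second per-cell scan (Counter, all(), first-non-default loop) with a single voting pass that maintains constant-size per-(index,label) aggregates (ones, zeros, all_binary, first, first-non-default), so the output phase reads each aggregate directly.
import Mathlib
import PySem

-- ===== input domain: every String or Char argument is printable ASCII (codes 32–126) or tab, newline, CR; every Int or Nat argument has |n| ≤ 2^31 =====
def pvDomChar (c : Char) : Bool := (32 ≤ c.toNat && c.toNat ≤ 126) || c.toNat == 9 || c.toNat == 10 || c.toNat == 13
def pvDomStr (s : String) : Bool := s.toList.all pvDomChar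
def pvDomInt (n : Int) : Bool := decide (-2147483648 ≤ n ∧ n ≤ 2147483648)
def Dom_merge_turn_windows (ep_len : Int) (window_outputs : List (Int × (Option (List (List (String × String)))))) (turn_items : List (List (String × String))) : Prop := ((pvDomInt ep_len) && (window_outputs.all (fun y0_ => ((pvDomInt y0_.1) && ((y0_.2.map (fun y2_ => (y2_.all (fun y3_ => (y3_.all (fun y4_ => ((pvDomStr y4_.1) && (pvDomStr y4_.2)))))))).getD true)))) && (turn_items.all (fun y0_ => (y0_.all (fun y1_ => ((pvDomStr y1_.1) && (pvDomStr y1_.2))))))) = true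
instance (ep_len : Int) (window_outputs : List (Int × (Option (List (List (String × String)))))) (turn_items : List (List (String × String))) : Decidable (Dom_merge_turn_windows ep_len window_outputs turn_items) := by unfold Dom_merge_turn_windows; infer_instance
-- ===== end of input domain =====

-- B replaces A's per-cell vote lists and second per-cell scan by one voting pass over
-- constant-size per-(index,label) aggregates; alternative decomposition, same asymptotics.

-- ===== PORT A =====
-- row.get(lab, "0") on an association-list row: first-match lookup, then str(...).strip()
-- (values are already strings, so str() is the identity)
def pvVote (row : List (String × String)) (lab : String) : String :=
  PySem.Str.strip ((PySem.Dict.mk row).getD lab "0")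

-- it["label"]: first-match lookup; total via default "" — exact whenever the key is
-- present (guaranteed by Pre_ wherever the Python evaluates it)
def pvLabel (it : List (String × String)) : String :=
  (PySem.Dict.mk it).getD "label" ""

-- A's 'first non-default' search loop with break, step for step
def pvFirstNonDefault : List String → Option String
  | [] => none
  | v :: rest =>
      if !(v == "" || v == "0" || v == "NA" || v == "N/A" || v == "None") then some v
      else pvFirstNonDefault rest

def merge_turn_windows (ep_len : Int) (window_outputs : List (Int × (Option (List (List (String × String)))))) (turn_items : List (List (String × String))) : List (List (String × String)) :=
  -- votes = [defaultdict(list) for _ in range(ep_len)]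
  let votes0 : List (PySem.Dict String (List String)) :=
    (PySem.List.pyRange 0 ep_len 1).map (fun _ => PySem.Dict.empty)
  let votes := window_outputs.foldl (fun votes wr =>
    match wr.2 with
    | none => votes
    | some rows =>
        (PySem.List.enumerate rows 0).foldl (fun votes orow =>
          let idx := wr.1 + orow.1
          if 0 ≤ idx ∧ idx < ep_len then
            turn_items.foldl (fun votes it =>
              let lab := pvLabel it
              -- votes[idx][lab].append(v)  (defaultdict(list)); idx in range by the guard
              PySem.List.pySetD votes idx
                ((PySem.List.pyGetD votes idx PySem.Dict.empty).modify lab []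
                  (fun vs => vs ++ [pvVote orow.2 lab]))) votes
          else votes) votes) votes0
  (PySem.List.pyRange 0 ep_len 1).map (fun i =>
    (turn_items.foldl (fun row it =>
      let lab := pvLabel it
      let vals := (PySem.List.pyGetD votes i PySem.Dict.empty).getD lab []
      let out :=
        if vals = [] then "0"
        else if vals.all (fun v => v == "0" || v == "1") then
          -- Counter(vals); c.get("1",0) > c.get("0",0)
          (if (PySem.Dict.counter vals).getD "1" 0 > (PySem.Dict.counter vals).getD "0" 0
           then "1" else "0")
        else
          match pvFirstNonDefault vals with
          | some p => p
          | none => vals.headD ""   -- vals[0]; vals ≠ [] here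
      row.insert lab out) PySem.Dict.empty).items)

-- ===== PORT B =====
-- the constant-size aggregate B keeps per (index, label)
structure PvAgg where
  ones : Int
  zeros : Int
  allBin : Bool
  first : String
  nonDef : Option String
deriving DecidableEq, Repr

def pvIsDefault (v : String) : Bool :=
  v == "" || v == "0" || v == "NA" || v == "N/A" || v == "None"

-- B's per-vote aggregate update
def pvAggStep (a : Option PvAgg) (v : String) : PvAgg :=
  let s : PvAgg := match a with
    | some s => s
    | none => { ones := 0, zeros := 0, allBin := true, first := v, nonDef := none }
  let s :=
    if v == "1" then { s with ones := s.ones + 1 }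
    else if v == "0" then { s with zeros := s.zeros + 1 }
    else { s with allBin := false }
  if s.nonDef = none && !pvIsDefault v then { s with nonDef := some v } else s

-- B's inner voting loop over turn_items for one in-range row
def pvAggRow (ep_len : Int) (turn_items : List (List (String × String)))
    (idx : Int) (row : List (String × String))
    (agg : PySem.Dict (Int × String) PvAgg) : PySem.Dict (Int × String) PvAgg :=
  if 0 ≤ idx ∧ idx < ep_len then
    turn_items.foldl (fun agg it =>
      let lab := pvLabel it
      agg.insert (idx, lab) (pvAggStep (agg.get? (idx, lab)) (pvVote row lab))) agg
  else agg

-- B's pass over one window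
def pvAggWin (ep_len : Int) (turn_items : List (List (String × String)))
    (agg : PySem.Dict (Int × String) PvAgg)
    (wr : Int × Option (List (List (String × String)))) : PySem.Dict (Int × String) PvAgg :=
  match wr.2 with
  | none => agg
  | some rows =>
      (PySem.List.enumerate rows 0).foldl
        (fun agg orow => pvAggRow ep_len turn_items (wr.1 + orow.1) orow.2 agg) agg

-- B's output cell from an aggregate
def pvCell (a : Option PvAgg) : String :=
  match a with
  | none => "0"
  | some s =>
      if s.allBin then (if s.ones > s.zeros then "1" else "0")
      else match s.nonDef with
           | some p => p
           | none => s.first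

def merge_turn_windows_alt (ep_len : Int) (window_outputs : List (Int × (Option (List (List (String × String)))))) (turn_items : List (List (String × String))) : List (List (String × String)) :=
  let agg := window_outputs.foldl (pvAggWin ep_len turn_items) PySem.Dict.empty
  (PySem.List.pyRange 0 ep_len 1).map (fun i =>
    (turn_items.foldl (fun row it =>
      let lab := pvLabel it
      row.insert lab (pvCell (agg.get? (i, lab)))) PySem.Dict.empty).items)

-- ===== PRECONDITION & SPEC =====
-- Pre_ excludes exactly the inputs on which A raises KeyError: it["label"] is evaluated
-- (i.e. ep_len > 0, or a window row lands in range — impossible when ep_len ≤ 0) while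
-- some turn_item lacks the key "label".
def Pre_merge_turn_windows (ep_len : Int) (window_outputs : List (Int × (Option (List (List (String × String)))))) (turn_items : List (List (String × String))) : Prop :=
  ep_len ≤ 0 ∨ ∀ it ∈ turn_items, (PySem.Dict.mk it).contains "label" = true
instance (ep_len : Int) (window_outputs : List (Int × (Option (List (List (String × String)))))) (turn_items : List (List (String × String))) : Decidable (Pre_merge_turn_windows ep_len window_outputs turn_items) := by unfold Pre_merge_turn_windows; infer_instance

def pvWitness_merge_turn_windows : Int × (List (Int × (Option (List (List (String × String)))))) × (List (List (String × String))) :=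
  (2, [(0, some [[("x", "1"), ("y", "no")], [("x", " 1 ")]]), (1, none)], [[("label", "x")], [("label", "y")]])

def Spec_merge_turn_windows (ep_len : Int) (window_outputs : List (Int × (Option (List (List (String × String)))))) (turn_items : List (List (String × String))) (out : List (List (String × String))) : Prop := out = merge_turn_windows_alt ep_len window_outputs turn_items
instance (ep_len : Int) (window_outputs : List (Int × (Option (List (List (String × String)))))) (turn_items : List (List (String × String))) (out : List (List (String × String))) : Decidable (Spec_merge_turn_windows ep_len window_outputs turn_items out) := by unfold Spec_merge_turn_windows; infer_instance

-- ===== CLAIM (what is proved, stated in full; the proofs are below) =====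
def Claim_equal_merge_turn_windows : Prop := ∀ (ep_len : Int) (window_outputs : List (Int × (Option (List (List (String × String)))))) (turn_items : List (List (String × String))), Dom_merge_turn_windows ep_len window_outputs turn_items → Pre_merge_turn_windows ep_len window_outputs turn_items → Spec_merge_turn_windows ep_len window_outputs turn_items (merge_turn_windows ep_len window_outputs turn_items)

-- ===== LEMMAS AND PROOFS =====

-- the summary of a vote list that B maintains incrementally
def pvToAgg : List String → Option PvAgg
  | [] => none
  | x :: t => some { ones := ((x :: t).count "1" : Int), zeros := ((x :: t).count "0" : Int),
                     allBin := (x :: t).all (fun v => v == "0" || v == "1"),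
                     first := x,
                     nonDef := (x :: t).find? (fun v => !pvIsDefault v) }


theorem pvToAgg_append (vs : List String) (v : String) :
    pvToAgg (vs ++ [v]) = some (pvAggStep (pvToAgg vs) v) := by
  cases vs with
  | nil =>
      by_cases h1 : v = "1"
      · subst h1; rfl
      · by_cases h0 : v = "0"
        · subst h0; rfl
        · simp [pvToAgg, pvAggStep, h1, h0, pvIsDefault]
          split_ifs <;> simp [h0, h1]
  | cons x t =>
      have hc : ∀ w : String, List.count w (x :: (t ++ [v]))
          = List.count w (x :: t) + (if v == w then 1 else 0) := by
        intro w
        rw [← List.cons_append, List.count_append]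
        simp [List.count_cons]
      have hall : (x :: (t ++ [v])).all (fun u => u == "0" || u == "1")
          = ((x :: t).all (fun u => u == "0" || u == "1") && (v == "0" || v == "1")) := by
        rw [← List.cons_append, List.all_append]
        simp
      have hfind : List.find? (fun u => !pvIsDefault u) (x :: (t ++ [v]))
          = (List.find? (fun u => !pvIsDefault u) (x :: t)).or
              (if !pvIsDefault v then some v else none) := by
        rw [← List.cons_append, List.find?_append]
        congr 1
        rw [List.find?_cons]
        cases hb : (!pvIsDefault v) <;> simp
      simp only [List.cons_append, pvToAgg, pvAggStep, hc, hall, hfind]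
      clear hc hall hfind
      generalize List.find? (fun u => !pvIsDefault u) (x :: t) = F
      by_cases h1 : v = "1"
      · subst h1; cases F <;> simp [Option.or, show pvIsDefault "1" = false from rfl]
      · by_cases h0 : v = "0"
        · subst h0; cases F <;> simp [Option.or, show pvIsDefault "0" = true from rfl]
        · cases hd : pvIsDefault v <;> cases F <;>
            simp [h1, h0, Option.or]


-- A's search loop equals find?  (used only inside pvCell_eq)
theorem pvFirstNonDefault_eq (vs : List String) :
    pvFirstNonDefault vs = vs.find? (fun v => !pvIsDefault v) := by
  induction vs with
  | nil => rfl
  | cons x t ih =>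
      rw [List.find?_cons]
      cases hb : (!(x == "" || x == "0" || x == "NA" || x == "N/A" || x == "None")) <;>
        simp [pvFirstNonDefault, pvIsDefault, hb, ih]


-- the cell A computes from a vote list equals B's cell from the aggregate
theorem pvCell_eq (vs : List String) :
    (if vs = [] then "0"
     else if vs.all (fun v => v == "0" || v == "1") then
       (if (PySem.Dict.counter vs).getD "1" 0 > (PySem.Dict.counter vs).getD "0" 0
        then "1" else "0")
     else
       match pvFirstNonDefault vs with
       | some p => p
       | none => vs.headD "") = pvCell (pvToAgg vs) := by
  cases vs with
  | nil => rfl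
  | cons x t =>
      rw [pvFirstNonDefault_eq]
      simp only [pvToAgg, pvCell, PySem.Dict.getD_counter, List.headD_cons,
        if_neg (List.cons_ne_nil x t)]


-- the simulation invariant between A's vote table and B's aggregate dictionary
def pvInv (ep_len : Int) (votes : List (PySem.Dict String (List String)))
    (agg : PySem.Dict (Int × String) PvAgg) : Prop :=
  votes.length = ep_len.toNat ∧
  ∀ (i : Int) (lab : String), 0 ≤ i → i < ep_len →
    agg.get? (i, lab) = pvToAgg ((PySem.List.pyGetD votes i PySem.Dict.empty).getD lab [])

theorem pvInv_step (ep_len idx : Int) (lab v : String)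
    (votes : List (PySem.Dict String (List String))) (agg : PySem.Dict (Int × String) PvAgg)
    (h : pvInv ep_len votes agg) (h0 : 0 ≤ idx) (h1 : idx < ep_len) :
    pvInv ep_len
      (PySem.List.pySetD votes idx
        ((PySem.List.pyGetD votes idx PySem.Dict.empty).modify lab [] (fun vs => vs ++ [v])))
      (agg.insert (idx, lab) (pvAggStep (agg.get? (idx, lab)) v)) := by
  obtain ⟨hlen, hget⟩ := h
  have hn : idx = ((idx.toNat : Nat) : Int) := (Int.toNat_of_nonneg h0).symm
  have hlt : idx.toNat < votes.length := by omega
  constructor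
  · rw [PySem.List.length_pySetD]; exact hlen
  · intro i lab' hi0 hi1
    rw [PySem.Dict.get?_insert]
    by_cases hik : i = idx
    · subst hik
      have hv : ∀ D : PySem.Dict String (List String),
          PySem.List.pyGetD (PySem.List.pySetD votes i D) i PySem.Dict.empty = D := by
        intro D
        conv_lhs => rw [hn]
        rw [PySem.List.pyGetD_pySetD_natCast _ _ _ _ _ hlt, if_pos rfl]
      rw [hv]
      by_cases hlk : lab' = lab
      · subst hlk
        rw [if_pos rfl, PySem.Dict.getD_modify_self, pvToAgg_append,
          hget i lab' hi0 hi1]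
      · rw [if_neg (by simp [hlk]), PySem.Dict.getD_modify_of_ne _ _ _ hlk,
          hget i lab' hi0 hi1]
    · have hni : i = ((i.toNat : Nat) : Int) := (Int.toNat_of_nonneg hi0).symm
      have hv : PySem.List.pyGetD (PySem.List.pySetD votes idx
          ((PySem.List.pyGetD votes idx PySem.Dict.empty).modify lab [] (fun vs => vs ++ [v])))
          i PySem.Dict.empty = PySem.List.pyGetD votes i PySem.Dict.empty := by
        conv_lhs => rw [hn, hni]
        rw [PySem.List.pyGetD_pySetD_natCast _ _ _ _ _ hlt, if_neg (by omega), ← hni]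
      rw [hv, if_neg (by simp [hik]), hget i lab' hi0 hi1]

-- generic two-sided fold simulation
theorem pvFoldlRel {α σ τ : Type} (R : σ → τ → Prop) (fA : σ → α → σ) (fB : τ → α → τ)
    (hstep : ∀ s t x, R s t → R (fA s x) (fB t x)) :
    ∀ (l : List α) (s : σ) (t : τ), R s t → R (l.foldl fA s) (l.foldl fB t) := by
  intro l
  induction l with
  | nil => intro s t h; exact h
  | cons x xs ih => intro s t h; exact ih _ _ (hstep s t x h)

theorem pvInv_init (ep_len : Int) :
    pvInv ep_len ((PySem.List.pyRange 0 ep_len 1).map (fun _ => PySem.Dict.empty))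
      PySem.Dict.empty := by
  constructor
  · simp [PySem.List.length_pyRange_one]
  · intro i lab hi0 hi1
    have hlen : (((PySem.List.pyRange 0 ep_len 1).map
        (fun _ => (PySem.Dict.empty : PySem.Dict String (List String)))).length) = ep_len.toNat := by
      simp [PySem.List.length_pyRange_one]
    rw [PySem.List.pyGetD_eq_getElem _ _ hi0 (by omega)]
    simp [PySem.Dict.get?_empty, PySem.Dict.getD_empty, pvToAgg]

-- ===== VERDICT (by name: the statement is the Claim_ definition above) =====
theorem merge_turn_windows_spec : Claim_equal_merge_turn_windows := by
  intro ep_len wos tis _ _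
  unfold Spec_merge_turn_windows merge_turn_windows merge_turn_windows_alt
  have hinv : pvInv ep_len
      (wos.foldl (fun votes wr =>
        match wr.2 with
        | none => votes
        | some rows =>
            (PySem.List.enumerate rows 0).foldl (fun votes orow =>
              let idx := wr.1 + orow.1
              if 0 ≤ idx ∧ idx < ep_len then
                tis.foldl (fun votes it =>
                  let lab := pvLabel it
                  PySem.List.pySetD votes idx
                    ((PySem.List.pyGetD votes idx PySem.Dict.empty).modify lab []
                      (fun vs => vs ++ [pvVote orow.2 lab]))) votes
              else votes) votes)
        ((PySem.List.pyRange 0 ep_len 1).map (fun _ => PySem.Dict.empty)))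
      (wos.foldl (pvAggWin ep_len tis) PySem.Dict.empty) := by
    apply pvFoldlRel (pvInv ep_len) _ _ _ _ _ _ (pvInv_init ep_len)
    intro s t wr h
    unfold pvAggWin
    cases wr.2 with
    | none => exact h
    | some rows =>
        simp only
        apply pvFoldlRel (pvInv ep_len) _ _ _ _ _ _ h
        intro s t orow h
        unfold pvAggRow
        by_cases hg : 0 ≤ wr.1 + orow.1 ∧ wr.1 + orow.1 < ep_len
        · simp only [if_pos hg]
          apply pvFoldlRel (pvInv ep_len) _ _ _ _ _ _ h
          intro s t it h
          exact pvInv_step ep_len _ _ _ _ _ h hg.1 hg.2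
        · simp only [if_neg hg]; exact h
  apply List.map_congr_left
  intro i hi
  rw [PySem.List.mem_pyRange_one] at hi
  congr 1
  apply PySem.List.foldl_congr_mem
  intro row it _
  simp only [hinv.2 i (pvLabel it) hi.1 hi.2, pvCell_eq]
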